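-- pv_equiv track=rewrite | github.com/crapas1974/algo2 | result/ds/05_equation_check.py | count_meaningless_brackets
-- ===== SOURCE A (Python) =====
-- def count_meaningless_brackets(expression):
--     bracket_mapping = {')': '(', '}': '{', ']': '['}
--     stack = []
--     previous_bracket = False
--     previous_continuous_bracket = False
--     count = 0
--
--     for char in expression:
--         if char in bracket_mapping:
--             if not stack or stack[-1] != bracket_mapping[char]:
--                 return False
--             if previous_bracket and not previous_continuous_bracket:
--                 count += 1
--                 previous_continuous_bracket = True
--             stack.pop()
--             previous_bracket = True
--         else:
--             previous_continuous_bracket = False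
--             previous_bracket = False
--             if char in bracket_mapping.values():
--                 stack.append(char)
--
--     return count
-- ===== SOURCE B (Python) =====
-- def count_meaningless_brackets(expression):
--     # Pass 1: pure validation (same mismatch test as the original).
--     mapping = {')': '(', '}': '{', ']': '['}
--     stack = []
--     for char in expression:
--         if char in mapping:
--             if not stack or stack[-1] != mapping[char]:
--                 return False
--             stack.pop()
--         elif char in '({[':
--             stack.append(char)
--     # Pass 2: count maximal runs of >= 2 consecutive closing brackets.
--     count = 0
--     run = 0
--     for char in expression:
--         if char in mapping:
--             run += 1
--             if run == 2:
--                 count += 1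
--         else:
--             run = 0
--     return count
-- ===== Notes on version B (the rewrite author's own statement) =====
-- stated objective: simpler
-- what changed: Replaces the interleaved two-boolean-flag counting inside the matching loop by two independent passes: a pure stack validation pass, then a flag-free run-length scan that counts maximal runs of >=2 consecutive closing brackets.
-- outside the precondition, e.g. on count_meaningless_brackets('(]'): A returns False, B returns False; on count_meaningless_brackets(')'): A returns False, B returns False
import Mathlib
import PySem

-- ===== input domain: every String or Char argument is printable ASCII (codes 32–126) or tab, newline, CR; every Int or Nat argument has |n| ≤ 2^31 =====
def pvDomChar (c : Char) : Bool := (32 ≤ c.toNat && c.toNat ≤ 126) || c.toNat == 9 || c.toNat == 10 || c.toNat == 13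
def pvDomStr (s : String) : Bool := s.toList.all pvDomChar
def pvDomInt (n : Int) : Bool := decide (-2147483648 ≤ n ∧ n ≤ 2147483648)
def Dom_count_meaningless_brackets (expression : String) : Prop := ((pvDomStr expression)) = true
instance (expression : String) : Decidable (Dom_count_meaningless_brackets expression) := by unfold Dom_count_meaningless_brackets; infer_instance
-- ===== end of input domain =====

-- B replaces A's interleaved flag-based counting with two independent passes (validate, then a run-length scan); objective: simpler.
-- On invalid expressions Python A (and B) return False, not an int; those inputs lie outside Pre_ and both ports return 0 there.

-- ===== PORT A =====
def pvIsClose (c : Char) : Bool := c = ')' || c = '}' || c = ']'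
def pvIsOpen (c : Char) : Bool := c = '(' || c = '{' || c = '['
def pvTarget (c : Char) : Char := if c = ')' then '(' else if c = '}' then '{' else '['

-- the original loop: state = (stack, previous_bracket, previous_continuous_bracket, count); none = early `return False`
def aLoop : List Char → List Char → Bool → Bool → Int → Option Int
  | [], _stack, _pB, _pC, count => some count
  | c :: rest, stack, pB, pC, count =>
    if pvIsClose c then
      match stack with
      | [] => none
      | top :: stk =>
        if top ≠ pvTarget c then none
        else if pB && !pC then aLoop rest stk true true (count + 1)
        else aLoop rest stk true pC count
    else
      if pvIsOpen c then aLoop rest (c :: stack) false false count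
      else aLoop rest stack false false count

def count_meaningless_brackets (expression : String) : Int :=
  (aLoop expression.toList [] false false 0).getD 0

-- ===== PORT B =====
-- pass 1 of Source B: pure stack validation
def bValidate : List Char → List Char → Bool
  | [], _stack => true
  | c :: rest, stack =>
    if pvIsClose c then
      match stack with
      | [] => false
      | top :: stk => if top ≠ pvTarget c then false else bValidate rest stk
    else
      if pvIsOpen c then bValidate rest (c :: stack)
      else bValidate rest stack

-- pass 2 of Source B: count maximal runs of ≥ 2 consecutive closing brackets
def bCount : List Char → Int → Int → Int
  | [], _run, count => count
  | c :: rest, run, count =>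
    if pvIsClose c then bCount rest (run + 1) (if run + 1 = 2 then count + 1 else count)
    else bCount rest 0 count

def count_meaningless_brackets_alt (expression : String) : Int :=
  if bValidate expression.toList [] then bCount expression.toList 0 0 else 0

-- ===== PRECONDITION & SPEC =====
-- Pre_ excludes exactly the invalid expressions (an unmatched or mismatched closing bracket), on
-- which Python A returns False — a bool, not a value of the declared int type (B returns False
-- there too).  Stated independently of both ports as a one-step stack transition folded over the
-- string (none = a closing bracket without a matching open).
def pvStep (st : Option (List Char)) (c : Char) : Option (List Char) :=
  st.bind fun stack =>
    if pvIsClose c then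
      match stack with
      | [] => none
      | top :: stk => if top = pvTarget c then some stk else none
    else if pvIsOpen c then some (c :: stack) else some stack

def Pre_count_meaningless_brackets (expression : String) : Prop :=
  (expression.toList.foldl pvStep (some [])).isSome = true
instance (expression : String) : Decidable (Pre_count_meaningless_brackets expression) := by
  unfold Pre_count_meaningless_brackets; infer_instance

def pvWitness_count_meaningless_brackets : String := "a(())[]{}b"

def Spec_count_meaningless_brackets (expression : String) (out : Int) : Prop := out = count_meaningless_brackets_alt expression
instance (expression : String) (out : Int) : Decidable (Spec_count_meaningless_brackets expression out) := by unfold Spec_count_meaningless_brackets; infer_instance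

-- ===== CLAIM (what is proved, stated in full; the proofs are below) =====
def Claim_equal_count_meaningless_brackets : Prop := ∀ (expression : String), Dom_count_meaningless_brackets expression → Pre_count_meaningless_brackets expression → Spec_count_meaningless_brackets expression (count_meaningless_brackets expression)

-- ===== LEMMAS AND PROOFS =====

theorem foldl_pvStep_none (cs : List Char) : cs.foldl pvStep none = none := by
  induction cs with
  | nil => rfl
  | cons c rest ih => simpa [pvStep] using ih

-- bridge: the declarative fold in Pre_ agrees with Source B's validation pass
theorem foldl_pvStep_eq_bValidate (cs : List Char) : ∀ (stack : List Char),
    (cs.foldl pvStep (some stack)).isSome = bValidate cs stack := by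
  induction cs with
  | nil => intro stack; rfl
  | cons c rest ih =>
    intro stack
    by_cases hc : pvIsClose c = true
    · cases stack with
      | nil => simp [pvStep, bValidate, hc, foldl_pvStep_none]
      | cons top stk =>
        by_cases ht : top = pvTarget c
        · simp [pvStep, bValidate, hc, ht, ih]
        · simp [pvStep, bValidate, hc, ht, foldl_pvStep_none]
    · have hc' : pvIsClose c = false := by simpa using hc
      by_cases ho : pvIsOpen c = true
      · simp [pvStep, bValidate, hc', ho, ih]
      · have ho' : pvIsOpen c = false := by simpa using ho
        simp [pvStep, bValidate, hc', ho', ih]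

-- Invariant linking A's flags to B's run length: pB ↔ run ≥ 1, pC ↔ run ≥ 2.
theorem aLoop_eq_bCount (cs : List Char) : ∀ (stack : List Char) (r count : Int),
    0 ≤ r → bValidate cs stack = true →
    aLoop cs stack (decide (1 ≤ r)) (decide (2 ≤ r)) count = some (bCount cs r count) := by
  induction cs with
  | nil => intro stack r count hr hv; simp [aLoop, bCount]
  | cons c rest ih =>
    intro stack r count hr hv
    by_cases hc : pvIsClose c = true
    · cases stack with
      | nil => simp [bValidate, hc] at hv
      | cons top stk =>
        by_cases ht : top = pvTarget c
        · have hv' : bValidate rest stk = true := by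
            simpa [bValidate, hc, ht] using hv
          by_cases h1 : r = 1
          · subst h1
            have e1 : aLoop (c :: rest) (top :: stk) (decide ((1:Int) ≤ 1)) (decide ((2:Int) ≤ 1)) count
                = aLoop rest stk true true (count + 1) := by
              simp [aLoop, hc, ht]
            rw [e1]
            have := ih stk 2 (count + 1) (by norm_num) hv'
            simp only [show (decide ((1:Int) ≤ 2)) = true by decide,
              show (decide ((2:Int) ≤ 2)) = true by decide] at this
            rw [this]
            simp [bCount, hc]
          · have e1 : aLoop (c :: rest) (top :: stk) (decide (1 ≤ r)) (decide (2 ≤ r)) count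
                = aLoop rest stk true (decide (2 ≤ r)) count := by
              by_cases h0 : r = 0
              · subst h0; simp [aLoop, hc, ht]
              · have h2 : 2 ≤ r := by omega
                simp [aLoop, hc, ht, h2]
            rw [e1]
            have hpB : (true : Bool) = decide (1 ≤ r + 1) := by
              have : (1:Int) ≤ r + 1 := by omega
              simp [this]
            have hpC : (decide (2 ≤ r)) = decide (2 ≤ r + 1) := by
              by_cases h0 : r = 0
              · subst h0; decide
              · have ha : (2:Int) ≤ r := by omega
                have hb : (2:Int) ≤ r + 1 := by omega
                simp [ha, hb]
            rw [hpB, hpC, ih stk (r + 1) count (by omega) hv']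
            have hne : ¬ (r + 1 = 2) := by omega
            simp [bCount, hc, hne]
        · simp [bValidate, hc, ht] at hv
    · have hc' : pvIsClose c = false := by simpa using hc
      have e0 : decide ((1:Int) ≤ 0) = false := by decide
      have e0' : decide ((2:Int) ≤ 0) = false := by decide
      by_cases ho : pvIsOpen c = true
      · have hv' : bValidate rest (c :: stack) = true := by
          simpa [bValidate, hc', ho] using hv
        have := ih (c :: stack) 0 count (by norm_num) hv'
        rw [e0, e0'] at this
        simp [aLoop, bCount, hc', ho, this]
      · have ho' : pvIsOpen c = false := by simpa using ho
        have hv' : bValidate rest stack = true := by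
          simpa [bValidate, hc', ho'] using hv
        have := ih stack 0 count (by norm_num) hv'
        rw [e0, e0'] at this
        simp [aLoop, bCount, hc', ho', this]

-- ===== VERDICT (by name: the statement is the Claim_ definition above) =====
theorem count_meaningless_brackets_spec : Claim_equal_count_meaningless_brackets := by
  intro e _hdom hpre
  unfold Spec_count_meaningless_brackets count_meaningless_brackets count_meaningless_brackets_alt
  have hv : bValidate e.toList [] = true := by
    rw [← foldl_pvStep_eq_bValidate]; exact hpre
  have := aLoop_eq_bCount e.toList [] 0 0 (by norm_num) hv
  simp only [show (decide ((1:Int) ≤ 0)) = false by decide,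
    show (decide ((2:Int) ≤ 0)) = false by decide] at this
  rw [this, hv]
  simp
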